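-- pv_equiv track=rewrite | github.com/MikeAI70B/empathy-in-action | empathy/core/ascii.py | render_ascii_grid
-- ===== SOURCE A (Python) =====
-- from typing import Dict, Tuple
--
-- Position = Tuple[int, int]
--
-- def render_ascii_grid(width: int, height: int, agent_positions: Dict[str, Position]) -> str:
--     # Top border: 14 '▮' for width 7 + borders and separators in example
--     # We will compute explicit layout based on width and height with inner cell separators using '|'
--     # Inner width count equals width
--     # Build top/bottom borders with 14 block for 7 columns, else scale proportionally
--     # A generic way: border is '▮' repeated (2 + width * 2)
--     border_len = 2 + width * 2
--     top_bottom = "".join(["▮" for _ in range(border_len)])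
--
--     # Build a mapping from positions to symbol (single uppercase letter)
--     pos_to_char: Dict[Position, str] = {}
--     for ch, pos in agent_positions.items():
--         pos_to_char[pos] = ch
--
--     lines = [top_bottom]
--     for r in range(height):
--         row_cells = []
--         for c in range(width):
--             cell_char = pos_to_char.get((r, c), "_")
--             row_cells.append(cell_char)
--         # Join with '|' and add side walls ▮ at both ends
--         line = "▮|" + "|".join(row_cells) + "|▮"
--         lines.append(line)
--     lines.append(top_bottom)
--     return "\n".join(lines)
-- ===== SOURCE B (Python) =====
-- def render_ascii_grid(width, height, agent_positions):
--     border = "\u25ae" * (2 + width * 2)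
--     # Group in-bounds agents by row: rows[r] maps column -> symbol (last writer wins).
--     rows = {}
--     for ch, (r, c) in agent_positions.items():
--         if 0 <= r < height and 0 <= c < width:
--             rows.setdefault(r, {})[c] = ch
--     lines = [border]
--     for r in range(height):
--         rd = rows.get(r, {})
--         # Build the row from sorted occupied columns: emit runs of empty cells
--         # between agents with string repetition instead of visiting every cell.
--         body = []
--         prev = 0
--         for c in sorted(rd):
--             body.append("_|" * (c - prev))
--             body.append(rd[c] + "|")
--             prev = c + 1
--         body.append("_|" * (width - prev))
--         lines.append("\u25ae|" + "".join(body)[:-1] + "|\u25ae")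
--     lines.append(border)
--     return "\n".join(lines)
-- ===== Notes on version B (the rewrite author's own statement) =====
-- stated objective: alternative
-- what changed: A scans every cell of the h x w grid and looks each (r,c) up in an inverted position dict; B groups in-bounds agents by row, sorts each row's occupied columns, and assembles every line from runs of empty cells (string repetition) between agent symbols, never visiting individual empty cells.
import Mathlib
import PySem

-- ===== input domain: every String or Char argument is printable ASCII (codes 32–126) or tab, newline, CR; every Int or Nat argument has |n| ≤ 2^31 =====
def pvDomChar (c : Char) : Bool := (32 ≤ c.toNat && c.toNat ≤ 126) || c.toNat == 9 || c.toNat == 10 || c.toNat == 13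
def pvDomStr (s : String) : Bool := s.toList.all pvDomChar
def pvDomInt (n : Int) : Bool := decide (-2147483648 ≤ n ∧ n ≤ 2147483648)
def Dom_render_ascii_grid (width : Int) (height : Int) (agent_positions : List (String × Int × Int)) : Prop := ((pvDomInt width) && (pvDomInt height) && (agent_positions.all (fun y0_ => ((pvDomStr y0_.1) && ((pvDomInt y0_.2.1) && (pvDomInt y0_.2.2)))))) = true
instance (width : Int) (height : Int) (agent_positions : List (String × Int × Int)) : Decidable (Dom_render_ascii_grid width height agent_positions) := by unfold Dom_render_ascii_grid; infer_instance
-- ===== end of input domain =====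

-- B replaces A's per-cell gather (look up every (r,c) in an inverted position dict) by grouping
-- in-bounds agents by row, sorting each row's occupied columns, and assembling every line from
-- runs of empty cells between the agent symbols (alternative decomposition, same return value).

-- ===== PORT A =====
-- literal transliteration of A: border via join over a range, pos→char dict built by a loop,
-- then per-row / per-cell gather with pos_to_char.get((r, c), "_").
def render_ascii_grid (width : Int) (height : Int) (agent_positions : List (String × Int × Int)) : String :=
  let border_len : Int := 2 + width * 2
  let top_bottom : String := PySem.Str.join "" ((PySem.List.pyRange 0 border_len 1).map (fun _ => "▮"))
  let pos_to_char : PySem.Dict (Int × Int) String :=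
    agent_positions.foldl (fun d p => d.insert (p.2.1, p.2.2) p.1) PySem.Dict.empty
  let lines : List String :=
    (PySem.List.pyRange 0 height 1).foldl (fun ls r =>
      let row_cells : List String :=
        (PySem.List.pyRange 0 width 1).foldl (fun cs c => cs ++ [pos_to_char.getD (r, c) "_"]) []
      ls ++ ["▮|" ++ PySem.Str.join "|" row_cells ++ "|▮"]) [top_bottom]
  PySem.Str.join "\n" (lines ++ [top_bottom])

-- ===== PORT B =====
-- literal transliteration of Source B.  "▮" * n and "_|" * n are PySem.List.pyRepeat
-- on the character lists (Python's s*n is empty for n ≤ 0).  rows.setdefault(r, {})[c] = ch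
-- mutates the inner dict held at key r: its value-level effect is re-inserting the updated
-- inner dict at r (Dict.insert overwrites in place, appends fresh keys — exactly setdefault
-- followed by the aliased item assignment).  rd[c] is ported as rd.getD c "_": c is always a
-- key of rd there (c comes from sorted(rd)), so the default is unreachable and getD is exact.
def render_ascii_grid_alt (width : Int) (height : Int) (agent_positions : List (String × Int × Int)) : String :=
  let border : String := String.ofList (PySem.List.pyRepeat ['▮'] (2 + width * 2))
  let rows : PySem.Dict Int (PySem.Dict Int String) :=
    agent_positions.foldl (fun rows p =>
      if 0 ≤ p.2.1 ∧ p.2.1 < height ∧ 0 ≤ p.2.2 ∧ p.2.2 < width then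
        rows.insert p.2.1 ((rows.getD p.2.1 PySem.Dict.empty).insert p.2.2 p.1)
      else rows) PySem.Dict.empty
  let lines : List String :=
    (PySem.List.pyRange 0 height 1).foldl (fun ls r =>
      let rd := rows.getD r PySem.Dict.empty
      let st : List String × Int :=
        (PySem.List.sorted rd.keys (fun x => x) false).foldl (fun bp c =>
          (bp.1 ++ [String.ofList (PySem.List.pyRepeat ['_', '|'] (c - bp.2)),
                    rd.getD c "_" ++ "|"], c + 1)) ([], 0)
      let body : List String := st.1 ++ [String.ofList (PySem.List.pyRepeat ['_', '|'] (width - st.2))]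
      ls ++ ["▮|" ++ PySem.Str.slice (PySem.Str.join "" body) none (some (-1)) ++ "|▮"]) [border]
  PySem.Str.join "\n" (lines ++ [border])

-- ===== PRECONDITION & SPEC =====
def Spec_render_ascii_grid (width : Int) (height : Int) (agent_positions : List (String × Int × Int)) (out : String) : Prop := out = render_ascii_grid_alt width height agent_positions
instance (width : Int) (height : Int) (agent_positions : List (String × Int × Int)) (out : String) : Decidable (Spec_render_ascii_grid width height agent_positions out) := by unfold Spec_render_ascii_grid; infer_instance

-- ===== CLAIM (what is proved, stated in full; the proofs are below) =====
def Claim_equal_render_ascii_grid : Prop := ∀ (width : Int) (height : Int) (agent_positions : List (String × Int × Int)), Dom_render_ascii_grid width height agent_positions → Spec_render_ascii_grid width height agent_positions (render_ascii_grid width height agent_positions)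

-- ===== LEMMAS AND PROOFS =====

-- join with the empty separator is flatten
theorem pvJoinNil (xs : List (List Char)) : PySem.Chars.join [] xs = xs.flatten := by
  induction xs with
  | nil => simp [PySem.Chars.join_nil]
  | cons a t ih =>
    cases t with
    | nil => simp [PySem.Chars.join, List.intercalate]
    | cons b t' => rw [PySem.Chars.join_cons_cons, List.flatten_cons, ← ih]; simp

-- the concatenation of "cell|" pieces is the '|'-join of the cells followed by one '|'
theorem pvFlattenJoin (a : List Char) (t : List (List Char)) :
    (((a :: t).map (fun s => s ++ ['|'])).flatten) = PySem.Chars.join ['|'] (a :: t) ++ ['|'] := by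
  induction t generalizing a with
  | nil => simp [PySem.Chars.join, List.intercalate]
  | cons b t' ih =>
    rw [List.map_cons, List.flatten_cons, ih b, PySem.Chars.join_cons_cons]
    simp

-- dropping the trailing '|' from the concatenation of "cell|" pieces is the '|'-join of the cells
theorem pvDropLastJoin (xs : List (List Char)) :
    ((xs.map (fun s => s ++ ['|'])).flatten).dropLast = PySem.Chars.join ['|'] xs := by
  induction xs with
  | nil => simp [PySem.Chars.join_nil]
  | cons a t ih =>
    rw [pvFlattenJoin, List.dropLast_concat]

-- A's joined border string equals B's repeated one
theorem pvBorder_eq (n : Int) :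
    PySem.Str.join "" ((PySem.List.pyRange 0 n 1).map (fun _ => "▮"))
      = String.ofList (PySem.List.pyRepeat ['▮'] n) := by
  apply String.toList_inj.mp
  rw [PySem.Str.toList_join, String.toList_ofList]
  rw [pvJoinNil, PySem.List.pyRepeat, List.map_map]
  have h3 : (String.toList ∘ fun (_ : Int) => "▮") = (fun (_ : Int) => ['▮']) := by
    funext x
    show "▮".toList = ['▮']
    decide
  rw [h3, List.map_const', PySem.List.length_pyRange_one]
  norm_num

-- the grouped-by-row dicts of B agree with A's flat position dict on every in-bounds cell,
-- have Nodup key lists, and only hold in-bounds columns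
theorem pvRows_inv (width height : Int) (ap : List (String × Int × Int))
    (rows : PySem.Dict Int (PySem.Dict Int String)) (d : PySem.Dict (Int × Int) String)
    (h1 : ∀ r : Int, ((rows.getD r PySem.Dict.empty).keys).Nodup)
    (h2 : ∀ r c : Int, c ∈ (rows.getD r PySem.Dict.empty).keys → 0 ≤ c ∧ c < width)
    (h3 : ∀ r c : Int, 0 ≤ r → r < height → 0 ≤ c → c < width →
      (rows.getD r PySem.Dict.empty).getD c "_" = d.getD (r, c) "_") :
    (∀ r : Int, (((ap.foldl (fun rows p =>
        if 0 ≤ p.2.1 ∧ p.2.1 < height ∧ 0 ≤ p.2.2 ∧ p.2.2 < width then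
          rows.insert p.2.1 ((rows.getD p.2.1 PySem.Dict.empty).insert p.2.2 p.1)
        else rows) rows).getD r PySem.Dict.empty).keys).Nodup) ∧
    (∀ r c : Int, c ∈ ((ap.foldl (fun rows p =>
        if 0 ≤ p.2.1 ∧ p.2.1 < height ∧ 0 ≤ p.2.2 ∧ p.2.2 < width then
          rows.insert p.2.1 ((rows.getD p.2.1 PySem.Dict.empty).insert p.2.2 p.1)
        else rows) rows).getD r PySem.Dict.empty).keys → 0 ≤ c ∧ c < width) ∧
    (∀ r c : Int, 0 ≤ r → r < height → 0 ≤ c → c < width →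
      ((ap.foldl (fun rows p =>
        if 0 ≤ p.2.1 ∧ p.2.1 < height ∧ 0 ≤ p.2.2 ∧ p.2.2 < width then
          rows.insert p.2.1 ((rows.getD p.2.1 PySem.Dict.empty).insert p.2.2 p.1)
        else rows) rows).getD r PySem.Dict.empty).getD c "_"
        = (ap.foldl (fun d p => d.insert (p.2.1, p.2.2) p.1) d).getD (r, c) "_") := by
  induction ap generalizing rows d with
  | nil => exact ⟨h1, h2, h3⟩
  | cons p rest ih =>
    obtain ⟨ch, ri, ci⟩ := p
    simp only [List.foldl_cons]
    by_cases hin : 0 ≤ ri ∧ ri < height ∧ 0 ≤ ci ∧ ci < width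
    · rw [if_pos hin]
      obtain ⟨hri0, hrih, hci0, hciw⟩ := hin
      apply ih
      · intro r
        rw [PySem.Dict.getD_insert]
        by_cases hr : r = ri
        · rw [if_pos hr]; exact PySem.Dict.nodup_keys_insert _ _ _ (h1 ri)
        · rw [if_neg hr]; exact h1 r
      · intro r c hc
        rw [PySem.Dict.getD_insert] at hc
        by_cases hr : r = ri
        · rw [if_pos hr] at hc
          rcases (PySem.Dict.mem_keys_insert _ _ _ _).mp hc with h | h
          · exact ⟨by omega, by omega⟩
          · exact h2 ri c h
        · rw [if_neg hr] at hc; exact h2 r c hc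
      · intro r c hr0 hrh hc0 hcw
        rw [PySem.Dict.getD_insert, PySem.Dict.getD_insert]
        by_cases hr : r = ri
        · subst hr
          rw [if_pos rfl, PySem.Dict.getD_insert]
          by_cases hc : c = ci
          · subst hc; rw [if_pos rfl, if_pos rfl]
          · rw [if_neg hc, if_neg (by simp [Prod.ext_iff, hc])]
            exact h3 r c hr0 hrh hc0 hcw
        · rw [if_neg hr, if_neg (by simp [Prod.ext_iff, hr])]
          exact h3 r c hr0 hrh hc0 hcw
    · rw [if_neg hin]
      apply ih rows _ h1 h2
      intro r c hr0 hrh hc0 hcw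
      rw [PySem.Dict.getD_insert, if_neg, ← h3 r c hr0 hrh hc0 hcw]
      intro hh
      rw [Prod.ext_iff] at hh
      exact hin ⟨by omega, by omega, by omega, by omega⟩

-- the inner per-row loop of B, named for the proofs
def pvBodyFold (g : Int → String) (cols : List Int) (acc : List String × Int) : List String × Int :=
  cols.foldl (fun bp c =>
    (bp.1 ++ [String.ofList (PySem.List.pyRepeat ['_', '|'] (c - bp.2)), g c ++ "|"], c + 1)) acc

-- the inner fold's accumulator splits off
theorem pvFoldAcc (g : Int → String) (cols : List Int) (acc : List String) (prev : Int) :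
    pvBodyFold g cols (acc, prev)
      = (acc ++ (pvBodyFold g cols ([], prev)).1, (pvBodyFold g cols ([], prev)).2) := by
  induction cols generalizing acc prev with
  | nil => simp [pvBodyFold]
  | cons c t ih =>
    simp only [pvBodyFold, List.foldl_cons]
    rw [show ∀ a p, List.foldl (fun (bp : List String × Int) c =>
        (bp.1 ++ [String.ofList (PySem.List.pyRepeat ['_', '|'] (c - bp.2)), g c ++ "|"], c + 1)) (a, p) t
        = pvBodyFold g t (a, p) from fun _ _ => rfl,
      show ∀ a p, List.foldl (fun (bp : List String × Int) c =>
        (bp.1 ++ [String.ofList (PySem.List.pyRepeat ['_', '|'] (c - bp.2)), g c ++ "|"], c + 1)) (a, p) t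
        = pvBodyFold g t (a, p) from fun _ _ => rfl]
    rw [ih _ (c + 1), ih ([] ++ _) (c + 1)]
    simp

-- a run of cells with no agent renders as repeated "_|"
theorem pvEmptyRun (g : Int → String) (a b : Int)
    (hdef : ∀ x : Int, a ≤ x → x < b → (g x).toList = ['_']) :
    ((PySem.List.pyRange a b 1).map (fun c => (g c).toList ++ ['|'])).flatten
      = PySem.List.pyRepeat ['_', '|'] (b - a) := by
  have hmap : (PySem.List.pyRange a b 1).map (fun c => (g c).toList ++ ['|'])
      = (PySem.List.pyRange a b 1).map (fun _ => ['_', '|']) := by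
    apply List.map_congr_left
    intro x hx
    rw [hdef x (PySem.List.mem_pyRange_one.mp hx).1 (PySem.List.mem_pyRange_one.mp hx).2]
    rfl
  rw [hmap, List.map_const', PySem.List.length_pyRange_one, PySem.List.pyRepeat]

-- segment construction over the sorted occupied columns equals the per-cell concatenation
theorem pvSeg (width : Int) (g : Int → String) (cols : List Int) (prev : Int)
    (hsort : cols.Pairwise (· < ·))
    (hbnd : ∀ c ∈ cols, prev ≤ c ∧ c < width)
    (hdef : ∀ c : Int, prev ≤ c → c < width → c ∉ cols → (g c).toList = ['_']) :
    PySem.Chars.join []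
      (((pvBodyFold g cols ([], prev)).1 ++
        [String.ofList (PySem.List.pyRepeat ['_', '|'] (width - (pvBodyFold g cols ([], prev)).2))]).map
        String.toList)
    = ((PySem.List.pyRange prev width 1).map (fun c => (g c).toList ++ ['|'])).flatten := by
  induction cols generalizing prev with
  | nil =>
    simp only [pvBodyFold, List.foldl_nil, List.nil_append, List.map_cons, List.map_nil,
      String.toList_ofList]
    rw [pvJoinNil]
    simp only [List.flatten_cons, List.flatten_nil, List.append_nil]
    rw [pvEmptyRun g prev width (fun x hx1 hx2 => hdef x hx1 hx2 (by simp))]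
  | cons c t ih =>
    obtain ⟨hc1, hc2⟩ := hbnd c (by simp)
    have hstep : pvBodyFold g (c :: t) ([], prev)
        = pvBodyFold g t ([String.ofList (PySem.List.pyRepeat ['_', '|'] (c - prev)),
            g c ++ "|"], c + 1) := by
      simp [pvBodyFold]
    rw [hstep, pvFoldAcc]
    have hsplit : PySem.List.pyRange prev width 1
        = PySem.List.pyRange prev c 1 ++ (c :: PySem.List.pyRange (c + 1) width 1) := by
      rw [PySem.List.pyRange_one_append prev c width hc1 (by omega),
          PySem.List.pyRange_one_cons hc2]
    rw [hsplit]
    have iht := ih (c + 1) (List.Pairwise.sublist (List.sublist_cons_self c t) hsort)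
      (fun x hx => ⟨by have := (List.pairwise_cons.mp hsort).1 x hx; omega,
        (hbnd x (by simp [hx])).2⟩)
      (fun x hx1 hx2 hx3 => hdef x (by omega) hx2 (by
        simp only [List.mem_cons, not_or]
        exact ⟨by omega, hx3⟩))
    rw [pvJoinNil] at iht ⊢
    simp only [List.map_append, List.map_cons, List.flatten_append, List.flatten_cons,
      String.toList_ofList, String.toList_append] at iht ⊢
    have hrun : ((PySem.List.pyRange prev c 1).map (fun x => (g x).toList ++ ['|'])).flatten
        = PySem.List.pyRepeat ['_', '|'] (c - prev) := by
      apply pvEmptyRun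
      intro x hx1 hx2
      apply hdef x hx1 (by omega)
      simp only [List.mem_cons, not_or]
      exact ⟨by omega, fun hxt => by have := (List.pairwise_cons.mp hsort).1 x hxt; omega⟩
    have h1 : "|".toList = ['|'] := rfl
    simp only [List.map_nil, List.flatten_nil, List.append_nil, h1, List.append_assoc] at iht ⊢
    rw [iht, hrun]

-- nodup + pairwise ≤ gives pairwise <
theorem pvPairwiseLt (l : List Int) (hnd : l.Nodup) (hle : l.Pairwise (· ≤ ·)) :
    l.Pairwise (· < ·) := by
  have := List.Pairwise.and hnd hle
  exact this.imp (fun h => lt_of_le_of_ne h.2 h.1)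

-- one data line: A's per-cell '|'-join equals B's segment-built line, for any row dict rd
-- agreeing with A's cell function D on in-bounds columns
theorem pvWrap {α β : Type} (x y : List β) (l : List α) (f g : α → β)
    (h : ∀ a ∈ l, f a = g a) : (x ++ l.map f) ++ y = (x ++ l.map g) ++ y := by
  rw [List.map_congr_left h]

theorem pvLineGen (width : Int) (rd : PySem.Dict Int String)
    (da : PySem.Dict (Int × Int) String) (r : Int)
    (hnd : rd.keys.Nodup) (hbk : ∀ c ∈ rd.keys, 0 ≤ c ∧ c < width)
    (hag : ∀ c : Int, 0 ≤ c → c < width → rd.getD c "_" = da.getD (r, c) "_") :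
    "▮|" ++ PySem.Str.join "|" ((PySem.List.pyRange 0 width 1).map (fun c => da.getD (r, c) "_")) ++ "|▮"
    = "▮|" ++ PySem.Str.slice (PySem.Str.join ""
        (((PySem.List.sorted rd.keys (fun x => x) false).foldl (fun bp c =>
            (bp.1 ++ [String.ofList (PySem.List.pyRepeat ['_', '|'] (c - bp.2)),
              rd.getD c "_" ++ "|"], c + 1)) ([], 0)).1 ++
          [String.ofList (PySem.List.pyRepeat ['_', '|']
            (width - ((PySem.List.sorted rd.keys (fun x => x) false).foldl (fun bp c =>
              (bp.1 ++ [String.ofList (PySem.List.pyRepeat ['_', '|'] (c - bp.2)),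
                rd.getD c "_" ++ "|"], c + 1)) ([], 0)).2))]))
        none (some (-1)) ++ "|▮" := by
  have hfold : ∀ pr : List String × Int,
      (PySem.List.sorted rd.keys (fun x => x) false).foldl (fun bp c =>
        (bp.1 ++ [String.ofList (PySem.List.pyRepeat ['_', '|'] (c - bp.2)),
          rd.getD c "_" ++ "|"], c + 1)) pr
      = pvBodyFold (fun c => rd.getD c "_") (PySem.List.sorted rd.keys (fun x => x) false) pr :=
    fun _ => rfl
  rw [hfold]
  apply congrArg (fun s => "▮|" ++ s ++ "|▮")
  apply String.toList_inj.mp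
  have hsep : "|".toList = ['|'] := rfl
  have hcols : ∀ c : Int, c ∈ PySem.List.sorted rd.keys (fun x => x) false ↔ c ∈ rd.keys :=
    fun c => PySem.List.mem_sorted rd.keys (fun x => x) false c
  have hseg := pvSeg width (fun c => rd.getD c "_")
    (PySem.List.sorted rd.keys (fun x => x) false) 0
    (pvPairwiseLt _ (((PySem.List.sorted_perm rd.keys (fun x => x) false).nodup_iff).mpr hnd)
      (PySem.List.sorted_pairwise rd.keys (fun x => x)))
    (fun c hc => ⟨(hbk c ((hcols c).mp hc)).1, (hbk c ((hcols c).mp hc)).2⟩)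
    (fun c _ hcw hc => by
      have hk : c ∉ rd.keys := fun hm => hc ((hcols c).mpr hm)
      have hcon : rd.contains c = false := by
        cases hcon : rd.contains c with
        | false => rfl
        | true => exact absurd ((PySem.Dict.contains_iff_mem_keys rd c).mp hcon) hk
      show (rd.getD c "_").toList = ['_']
      rw [PySem.Dict.getD_of_not_contains rd "_" hcon]
      rfl)
  rw [PySem.Str.toList_join, PySem.Str.slice_to_neg_one, PySem.Str.toList_join]
  have hsep0 : "".toList = ([] : List Char) := rfl
  rw [hsep, hsep0, hseg]
  have hmap : (PySem.List.pyRange 0 width 1).map (fun c => ((fun c => rd.getD c "_") c).toList ++ ['|'])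
      = ((PySem.List.pyRange 0 width 1).map (fun c => (da.getD (r, c) "_").toList)).map
          (fun s => s ++ ['|']) := by
    rw [List.map_map]
    apply List.map_congr_left
    intro c hc
    show (rd.getD c "_").toList ++ ['|'] = _
    rw [Function.comp_apply,
        hag c (PySem.List.mem_pyRange_one.mp hc).1 (PySem.List.mem_pyRange_one.mp hc).2]
  rw [hmap, pvDropLastJoin, List.map_map]
  rfl

set_option maxHeartbeats 1000000 in
theorem pvMain (width height : Int) (ap : List (String × Int × Int)) :
    render_ascii_grid width height ap = render_ascii_grid_alt width height ap := by
  obtain ⟨inv1, inv2, inv3⟩ := pvRows_inv width height ap PySem.Dict.empty PySem.Dict.empty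
    (by intro r; rw [PySem.Dict.getD_empty]; exact PySem.Dict.nodup_keys_empty)
    (by intro r c hc; rw [PySem.Dict.getD_empty, PySem.Dict.keys_empty] at hc; cases hc)
    (by intro r c _ _ _ _; rw [PySem.Dict.getD_empty, PySem.Dict.getD_empty, PySem.Dict.getD_empty])
  unfold render_ascii_grid render_ascii_grid_alt
  simp only [PySem.List.foldl_append_singleton_eq_map, List.nil_append]
  rw [pvBorder_eq (2 + width * 2)]
  set Rr : PySem.Dict Int (PySem.Dict Int String) := ap.foldl (fun rows p =>
      if 0 ≤ p.2.1 ∧ p.2.1 < height ∧ 0 ≤ p.2.2 ∧ p.2.2 < width then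
        rows.insert p.2.1 ((rows.getD p.2.1 PySem.Dict.empty).insert p.2.2 p.1)
      else rows) PySem.Dict.empty with hRr
  set Da : PySem.Dict (Int × Int) String :=
    ap.foldl (fun d p => d.insert (p.2.1, p.2.2) p.1) PySem.Dict.empty with hDa
  apply congrArg
  apply pvWrap
  intro r hr
  exact pvLineGen width (Rr.getD r PySem.Dict.empty) Da r
    (inv1 r) (fun c hc => inv2 r c hc)
    (fun c hc0 hcw => inv3 r c (PySem.List.mem_pyRange_one.mp hr).1
      (PySem.List.mem_pyRange_one.mp hr).2 hc0 hcw)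

-- ===== VERDICT (by name: the statement is the Claim_ definition above) =====
theorem render_ascii_grid_spec : Claim_equal_render_ascii_grid := by
  intro width height ap _
  unfold Spec_render_ascii_grid
  exact pvMain width height ap
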